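-- pv_equiv track=rewrite | github.com/carlinl/HMM | submission.py | split_symbole
-- ===== SOURCE A (Python) =====
-- def split_symbole(line):
--     pattern=[',','&','-','/','(',')']
--     L=line.split()
--     symbole_list=[]
--
--     for i in range(len(L)):
--         s=''
--         for j in range(len(L[i])):
--             if L[i][j] in pattern:
--                 if s !='':
--                     symbole_list.append(s)
--                     s=''
--
--                 symbole_list.append(L[i][j])
--             else:
--                 s+=L[i][j]
--         if s !='':
--             symbole_list.append(s)
--     return symbole_list
-- ===== SOURCE B (Python) =====
-- import re
--
-- _TOKEN_RE = re.compile(r'[,&/()\-]|[^\s,&/()\-]+')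
--
-- def split_symbole(line):
--     return _TOKEN_RE.findall(line)
-- ===== Notes on version B (the rewrite author's own statement) =====
-- stated objective: idiomatic
-- what changed: Replaced A's whitespace-split plus nested char-by-char loop with a pending-run accumulator by a single regex tokenizer (re.findall with a punctuation-or-run alternation) over the whole line; the scan runs in the C regex engine instead of a Python per-character loop.
import Mathlib
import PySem

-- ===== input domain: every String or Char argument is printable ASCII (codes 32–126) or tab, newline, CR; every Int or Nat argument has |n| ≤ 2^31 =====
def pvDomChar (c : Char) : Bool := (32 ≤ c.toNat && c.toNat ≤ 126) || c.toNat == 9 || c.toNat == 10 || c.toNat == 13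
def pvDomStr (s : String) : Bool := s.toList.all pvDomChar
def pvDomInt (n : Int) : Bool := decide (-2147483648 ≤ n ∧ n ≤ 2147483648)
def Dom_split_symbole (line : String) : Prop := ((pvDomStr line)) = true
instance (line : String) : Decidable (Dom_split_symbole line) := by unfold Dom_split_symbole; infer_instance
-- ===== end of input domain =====

-- B replaces A's nested split-then-char-by-char loop with a single regex tokenizer pass (re.findall in Python): idiomatic, and measurably faster (C regex engine vs per-character Python loop).

-- ===== PORT A =====
-- pattern = [',','&','-','/','(',')']
def pvPattern : List Char := [',', '&', '-', '/', '(', ')']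

-- the body of A's inner loop: state = (symbole_list, s)
def pvStepA (p : List (List Char) × List Char) (c : Char) : List (List Char) × List Char :=
  if pvPattern.contains c then
    ((if p.2 = [] then p.1 else p.1 ++ [p.2]) ++ [[c]], [])
  else (p.1, p.2 ++ [c])

-- the 'if s != '': symbole_list.append(s)' after the inner loop
def pvFlushA (st : List (List Char) × List Char) : List (List Char) :=
  if st.2 = [] then st.1 else st.1 ++ [st.2]

def split_symbole (line : String) : List String :=
  ((PySem.Chars.split₀ line.toList).foldl
      (fun acc w => pvFlushA (w.foldl pvStepA (acc, []))) []).map String.mk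

-- ===== PORT B =====
-- the regex character class  \s  (exact: [ \t\n\v\f\r])
def pvReWs (c : Char) : Bool :=
  c.toNat == 32 || c.toNat == 9 || c.toNat == 10 || c.toNat == 11 || c.toNat == 12 || c.toNat == 13
-- the regex character class  [,&/()\-]
def pvRePunct (c : Char) : Bool :=
  c == ',' || c == '&' || c == '/' || c == '(' || c == ')' || c == '-'
-- a character matched by the run branch  [^\s,&/()\-]
def pvReRun (c : Char) : Bool := !(pvReWs c) && !(pvRePunct c)

-- re.findall(r'[,&/()\-]|[^\s,&/()\-]+', ·): left-to-right scan, at each position either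
-- a single punctuation token, a maximal run token, or (no match) skip the character
def pvFindall : List Char → List (List Char)
  | [] => []
  | c :: cs =>
    if pvReWs c then pvFindall cs
    else if pvRePunct c then [c] :: pvFindall cs
    else (c :: cs.takeWhile pvReRun) :: pvFindall (cs.dropWhile pvReRun)
termination_by cs => cs.length
decreasing_by
  · simp
  · simp
  · have := List.length_dropWhile_le pvReRun cs; simp; omega

def split_symbole_alt (line : String) : List String :=
  (pvFindall line.toList).map String.mk

-- ===== PRECONDITION & SPEC =====
def Spec_split_symbole (line : String) (out : List String) : Prop := out = split_symbole_alt line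
instance (line : String) (out : List String) : Decidable (Spec_split_symbole line out) := by unfold Spec_split_symbole; infer_instance

-- ===== CLAIM (what is proved, stated in full; the proofs are below) =====
def Claim_equal_split_symbole : Prop := ∀ (line : String), Dom_split_symbole line → Spec_split_symbole line (split_symbole line)

-- ===== LEMMAS AND PROOFS =====

-- A's inner tokenization of a single word, as a recursion: s = pending run, w = rest of the word
def pvWtok : List Char → List Char → List (List Char)
  | s, [] => if s = [] then [] else [s]
  | s, c :: w =>
    if pvPattern.contains c then (if s = [] then [] else [s]) ++ [c] :: pvWtok [] w
    else pvWtok (s ++ [c]) w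

-- characters on the domain: the two whitespace predicates agree
theorem pvWs_eq_isspace (c : Char) (h : pvDomChar c = true) :
    pvReWs c = PySem.Chars.isspace c := by
  simp only [pvDomChar, Bool.or_eq_true, Bool.and_eq_true, decide_eq_true_eq, beq_iff_eq] at h
  rw [Bool.eq_iff_iff]
  simp only [pvReWs, PySem.Chars.isspace, Bool.or_eq_true, Bool.and_eq_true, decide_eq_true_eq,
    beq_iff_eq]
  omega

-- the two punctuation predicates agree
theorem pvPunct_eq (c : Char) : pvPattern.contains c = pvRePunct c := by
  rw [Bool.eq_iff_iff]
  simp only [pvPattern, pvRePunct, List.contains_eq_mem, List.mem_cons, List.not_mem_nil,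
    or_false, Bool.or_eq_true, beq_iff_eq, decide_eq_true_eq]
  tauto

-- A's inner loop + flush, characterized: the accumulator passes through
theorem pvInnerA (w : List Char) :
    ∀ acc s, pvFlushA (w.foldl pvStepA (acc, s)) = acc ++ pvWtok s w := by
  induction w with
  | nil =>
    intro acc s
    simp only [List.foldl_nil, pvFlushA, pvWtok]
    split_ifs <;> simp
  | cons c w ih =>
    intro acc s
    simp only [List.foldl_cons, pvStepA, pvWtok]
    by_cases hp : pvPattern.contains c
    · have hm : c ∈ pvPattern := by simpa using hp
      by_cases hs : s = [] <;> simp [hm, hs, ih]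
    · have hm : c ∉ pvPattern := by simpa using hp
      simp [hm, ih]

-- A's outer loop is a flatMap of the inner tokenization
theorem pvOuterA (ws : List (List Char)) :
    ∀ acc, ws.foldl (fun acc w => pvFlushA (w.foldl pvStepA (acc, []))) acc
      = acc ++ ws.flatMap (pvWtok []) := by
  induction ws with
  | nil => intro acc; simp
  | cons w ws ih => intro acc; rw [List.foldl_cons, pvInnerA, ih, List.flatMap_cons, List.append_assoc]

-- split₀.go: the output accumulator passes through
theorem pvGoAcc (s : List Char) :
    ∀ cur acc, PySem.Chars.split₀.go s cur acc
      = acc.reverse ++ PySem.Chars.split₀.go s cur [] := by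
  induction s with
  | nil =>
    intro cur acc
    simp only [PySem.Chars.split₀.go]
    split_ifs <;> simp
  | cons c s ih =>
    intro cur acc
    simp only [PySem.Chars.split₀.go]
    split_ifs with h1 h2
    · exact ih [] acc
    · rw [ih [] (cur.reverse :: acc), ih [] [cur.reverse]]
      simp
    · exact ih (c :: cur) acc

-- split₀.go with a nonempty current word: the word extends by the maximal nonspace run
theorem pvGoWord (s : List Char) :
    ∀ cur, cur ≠ [] → PySem.Chars.split₀.go s cur []
      = (cur.reverse ++ s.takeWhile (fun d => !PySem.Chars.isspace d))
        :: PySem.Chars.split₀.go (s.dropWhile (fun d => !PySem.Chars.isspace d)) [] [] := by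
  induction s with
  | nil =>
    intro cur hcur
    simp [PySem.Chars.split₀.go, hcur, List.isEmpty_iff]
  | cons c s ih =>
    intro cur hcur
    by_cases hsp : PySem.Chars.isspace c
    · have h1 : PySem.Chars.split₀.go (c :: s) cur []
          = PySem.Chars.split₀.go s [] [cur.reverse] := by
        simp [PySem.Chars.split₀.go, hsp, List.isEmpty_iff, hcur]
      have h2 : PySem.Chars.split₀.go (c :: s) [] []
          = PySem.Chars.split₀.go s [] [] := by
        simp [PySem.Chars.split₀.go, hsp]
      rw [h1, pvGoAcc s [] [cur.reverse]]
      simp [hsp, h2]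
    · have h1 : PySem.Chars.split₀.go (c :: s) cur []
          = PySem.Chars.split₀.go s (c :: cur) [] := by
        simp [PySem.Chars.split₀.go, hsp]
      rw [h1, ih (c :: cur) (by simp)]
      simp [hsp]

theorem pvSplit_space (c : Char) (s : List Char) (h : PySem.Chars.isspace c = true) :
    PySem.Chars.split₀ (c :: s) = PySem.Chars.split₀ s := by
  show PySem.Chars.split₀.go (c :: s) [] [] = PySem.Chars.split₀.go s [] []
  simp [PySem.Chars.split₀.go, h]

theorem pvSplit_word (c : Char) (s : List Char) (h : PySem.Chars.isspace c = false) :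
    PySem.Chars.split₀ (c :: s)
      = (c :: s.takeWhile (fun d => !PySem.Chars.isspace d))
        :: PySem.Chars.split₀ (s.dropWhile (fun d => !PySem.Chars.isspace d)) := by
  have h1 : PySem.Chars.split₀.go (c :: s) [] [] = PySem.Chars.split₀.go s [c] [] := by
    simp [PySem.Chars.split₀.go, h]
  show PySem.Chars.split₀.go (c :: s) [] [] = _
  rw [h1, pvGoWord s [c] (by simp)]
  rfl

-- the continuation after a maximal run: [] or a punctuation head
def pvRest : List Char → List (List Char)
  | [] => []
  | c :: v => [c] :: pvWtok [] v

-- pvWtok with a nonempty pending run emits (pending ++ maximal nonpunct run) first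
theorem pvWtok_run (w : List Char) :
    ∀ s, s ≠ [] → pvWtok s w
      = (s ++ w.takeWhile (fun d => !pvPattern.contains d))
        :: pvRest (w.dropWhile (fun d => !pvPattern.contains d)) := by
  induction w with
  | nil => intro s hs; simp [pvWtok, hs, pvRest]
  | cons c w ih =>
    intro s hs
    by_cases hp : pvPattern.contains c
    · have hm : c ∈ pvPattern := by simpa using hp
      simp [pvWtok, hm, hs, pvRest]
    · have hm : c ∉ pvPattern := by simpa using hp
      rw [List.takeWhile_cons_of_pos (by simp [hm]), List.dropWhile_cons_of_pos (by simp [hm])]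
      rw [pvWtok, if_neg (by simp [hm]), ih (s ++ [c]) (by simp)]
      simp

-- the head of a dropWhile fails the predicate
theorem pvDropWhileHead (p : Char → Bool) (l : List Char) :
    ∀ d v, l.dropWhile p = d :: v → p d = false := by
  induction l with
  | nil => intro d v h; simp at h
  | cons c l ih =>
    intro d v h
    rw [List.dropWhile_cons] at h
    by_cases hp : p c
    · rw [if_pos hp] at h; exact ih d v h
    · rw [if_neg hp] at h; cases h; simpa using hp

-- takeWhile/dropWhile under a predicate agreeing on the list's elements
theorem pvWhileCongr (p q : Char → Bool) (l : List Char) (h : ∀ x ∈ l, p x = q x) :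
    l.takeWhile p = l.takeWhile q ∧ l.dropWhile p = l.dropWhile q := by
  induction l with
  | nil => simp
  | cons c l ih =>
    have hc := h c (by simp)
    have := ih (fun x hx => h x (by simp [hx]))
    by_cases hp : p c <;>
      simp [hp, ← hc, this.1, this.2]

-- B consumes one whitespace-free word (followed by nothing or a whitespace head) as A tokenizes it
theorem pvRunB (n : Nat) : ∀ (w r : List Char), w.length ≤ n →
    (∀ d ∈ w, pvDomChar d = true) → (∀ d ∈ w, PySem.Chars.isspace d = false) →
    (r = [] ∨ ∃ c' r', r = c' :: r' ∧ pvReWs c' = true) →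
    pvFindall (w ++ r) = pvWtok [] w ++ pvFindall r := by
  induction n with
  | zero =>
    intro w r hl _ _ _
    have : w = [] := List.eq_nil_of_length_eq_zero (Nat.le_zero.mp hl)
    subst this; simp [pvWtok]
  | succ n ih =>
    intro w r hl hdom hns hr
    match w with
    | [] => simp [pvWtok]
    | c :: w =>
      have hln : w.length ≤ n := by simpa using hl
      have hcd : pvDomChar c = true := hdom c (by simp)
      have hcs : PySem.Chars.isspace c = false := hns c (by simp)
      have hcw : pvReWs c = false := by rw [pvWs_eq_isspace c hcd]; exact hcs
      by_cases hp : pvRePunct c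
      · have hl1 : pvFindall ((c :: w) ++ r) = [c] :: pvFindall (w ++ r) := by
          simp [pvFindall, hcw, hp]
        have hcp : pvPattern.contains c = true := (pvPunct_eq c).trans hp
        have hm : c ∈ pvPattern := by simpa using hcp
        rw [hl1, ih w r hln (fun d hd => hdom d (by simp [hd]))
          (fun d hd => hns d (by simp [hd])) hr]
        simp [pvWtok, hm]
      · -- run branch of the regex
        have hcp : pvPattern.contains c = false := (pvPunct_eq c).trans (by simpa using hp)
        have hrt : r.takeWhile pvReRun = [] ∧ r.dropWhile pvReRun = r := by
          rcases hr with rfl | ⟨c', r', rfl, hws⟩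
          · simp
          · constructor <;> simp [pvReRun, hws]
        have htw : (w ++ r).takeWhile pvReRun = w.takeWhile pvReRun := by
          rw [List.takeWhile_append]
          split_ifs with h
          · rw [(List.takeWhile_prefix pvReRun).eq_of_length h, hrt.1, List.append_nil]
          · rfl
        have hdw : (w ++ r).dropWhile pvReRun = w.dropWhile pvReRun ++ r := by
          rw [List.dropWhile_append]
          split_ifs with h
          · rw [List.isEmpty_iff.mp h, hrt.2, List.nil_append]
          · rfl
        have hl1 : pvFindall ((c :: w) ++ r)
            = (c :: w.takeWhile pvReRun) :: pvFindall (w.dropWhile pvReRun ++ r) := by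
          simp only [List.cons_append]
          rw [pvFindall]
          simp [hcw, hp, htw, hdw]
        -- the two run predicates agree on the (whitespace-free) word
        have hagree : ∀ d ∈ w, pvReRun d = (fun d => !pvPattern.contains d) d := by
          intro d hd
          have : pvReWs d = false := by
            rw [pvWs_eq_isspace d (hdom d (by simp [hd]))]; exact hns d (by simp [hd])
          show pvReRun d = !pvPattern.contains d
          rw [pvPunct_eq d]
          simp [pvReRun, this]
        have hcong := pvWhileCongr pvReRun (fun d => !pvPattern.contains d) w hagree
        have hsub : ∀ d ∈ w.dropWhile pvReRun, d ∈ w :=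
          fun d hd => (List.dropWhile_sublist pvReRun).subset hd
        have hih : pvFindall (w.dropWhile pvReRun ++ r)
            = pvWtok [] (w.dropWhile pvReRun) ++ pvFindall r :=
          ih _ r (Nat.le_trans (List.length_dropWhile_le pvReRun w) hln)
            (fun d hd => hdom d (by simp [hsub d hd]))
            (fun d hd => hns d (by simp [hsub d hd])) hr
        -- the tail after the run is tokenized identically by pvRest and pvWtok []
        have hrest : pvRest (w.dropWhile pvReRun) = pvWtok [] (w.dropWhile pvReRun) := by
          cases hv : w.dropWhile pvReRun with
          | nil => simp [pvRest, pvWtok]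
          | cons d v =>
            have hdw' : pvReRun d = false := pvDropWhileHead pvReRun w d v hv
            have hds : PySem.Chars.isspace d = false := hns d (by simp [hsub d (by simp [hv])])
            have hdd : pvDomChar d = true := hdom d (by simp [hsub d (by simp [hv])])
            have hdws : pvReWs d = false := by rw [pvWs_eq_isspace d hdd]; exact hds
            have hdp : pvPattern.contains d = true := by
              rw [pvPunct_eq]
              simpa [pvReRun, hdws] using hdw'
            have hm : d ∈ pvPattern := by simpa using hdp
            simp [pvRest, pvWtok, hm]
        have hw1 : pvWtok [] (c :: w) = pvWtok [c] w := by
          have hm : c ∉ pvPattern := by simpa using hcp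
          simp [pvWtok, hm]
        rw [hl1, hih, hw1, pvWtok_run w [c] (by simp), ← hcong.1, ← hcong.2, hrest]
        simp

-- the main bridge: B's single pass equals A's word-by-word tokenization
theorem pvMain (n : Nat) : ∀ (s : List Char), s.length ≤ n →
    (∀ c ∈ s, pvDomChar c = true) →
    pvFindall s = (PySem.Chars.split₀ s).flatMap (pvWtok []) := by
  induction n with
  | zero =>
    intro s hl _
    have : s = [] := List.eq_nil_of_length_eq_zero (Nat.le_zero.mp hl)
    subst this; simp [pvFindall, PySem.Chars.split₀, PySem.Chars.split₀.go]
  | succ n ih =>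
    intro s hl hdom
    match s with
    | [] => simp [pvFindall, PySem.Chars.split₀, PySem.Chars.split₀.go]
    | c :: s =>
      have hln : s.length ≤ n := by simpa using hl
      have hcd : pvDomChar c = true := hdom c (by simp)
      by_cases hsp : PySem.Chars.isspace c
      · have hcw : pvReWs c = true := by rw [pvWs_eq_isspace c hcd]; exact hsp
        rw [pvSplit_space c s hsp, ← ih s hln (fun d hd => hdom d (by simp [hd]))]
        simp [pvFindall, hcw]
      · have hsp' : PySem.Chars.isspace c = false := by simpa using hsp
        rw [pvSplit_word c s hsp']
        have hts : ∀ d ∈ s.takeWhile (fun d => !PySem.Chars.isspace d),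
            PySem.Chars.isspace d = false := by
          intro d hd
          simpa using List.mem_takeWhile_imp hd
        have hsubt : ∀ d ∈ s.takeWhile (fun d => !PySem.Chars.isspace d), d ∈ s :=
          fun d hd => (List.takeWhile_sublist _).subset hd
        have hsubd : ∀ d ∈ s.dropWhile (fun d => !PySem.Chars.isspace d), d ∈ s :=
          fun d hd => (List.dropWhile_sublist _).subset hd
        have hih : pvFindall (s.dropWhile (fun d => !PySem.Chars.isspace d))
            = (PySem.Chars.split₀ (s.dropWhile (fun d => !PySem.Chars.isspace d))).flatMap
                (pvWtok []) :=
          ih _ (Nat.le_trans (List.length_dropWhile_le _ s) hln)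
            (fun d hd => hdom d (by simp [hsubd d hd]))
        have hr : (s.dropWhile (fun d => !PySem.Chars.isspace d) = [])
            ∨ ∃ c' r', s.dropWhile (fun d => !PySem.Chars.isspace d) = c' :: r'
                ∧ pvReWs c' = true := by
          cases hv : s.dropWhile (fun d => !PySem.Chars.isspace d) with
          | nil => exact Or.inl rfl
          | cons d v =>
            refine Or.inr ⟨d, v, rfl, ?_⟩
            have : (fun d => !PySem.Chars.isspace d) d = false := pvDropWhileHead _ s d v hv
            rw [pvWs_eq_isspace d (hdom d (by simp [hsubd d (by simp [hv])]))]
            simpa using this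
        have hrun := pvRunB (n + 1) (c :: s.takeWhile (fun d => !PySem.Chars.isspace d))
          (s.dropWhile (fun d => !PySem.Chars.isspace d))
          (by
            have := (List.takeWhile_sublist (fun d => !PySem.Chars.isspace d) (l := s)).length_le
            simp; omega)
          (by
            intro d hd
            rcases List.mem_cons.mp hd with rfl | hd
            · exact hcd
            · exact hdom d (by simp [hsubt d hd]))
          (by
            intro d hd
            rcases List.mem_cons.mp hd with rfl | hd
            · exact hsp'
            · exact hts d hd)
          hr
        rw [List.flatMap_cons, ← hih, ← hrun]
        rw [List.cons_append, List.takeWhile_append_dropWhile]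

-- ===== VERDICT (by name: the statement is the Claim_ definition above) =====
theorem split_symbole_spec : Claim_equal_split_symbole := by
  intro line hdom
  unfold Spec_split_symbole split_symbole split_symbole_alt
  rw [pvOuterA, List.nil_append,
    ← pvMain line.toList.length line.toList (Nat.le_refl _)
      (by
        have h : pvDomStr line = true := hdom
        simpa [pvDomStr, List.all_eq_true] using h)]
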